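-- pv_equiv track=rewrite | github.com/sunilsoni/interview-notes-python | com/interview/2026/common/test8.py | ArithmeticEquation
-- ===== SOURCE A (Python) =====
-- def ArithmeticEquation(N):
--     MOD = 1000007
--     # (x-N!)(y-N!) = (N!)^2, count divisors of (N!)^2
--     # For each prime p <= N, find exponent in N! via Legendre
--     # divisors of (N!)^2 = product of (2*exp+1)
--     sieve = [True] * (N + 1)
--     primes = []
--     for i in range(2, N + 1):
--         if sieve[i]:
--             primes.append(i)
--             for j in range(i * i, N + 1, i):
--                 sieve[j] = False
--     result = 1
--     for p in primes:
--         exp = 0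
--         pk = p
--         while pk <= N:
--             exp += N // pk
--             pk *= p
--         result = result * (2 * exp + 1) % MOD
--     return result
-- ===== SOURCE B (Python) =====
-- def ArithmeticEquation(N):
--     MOD = 1000007
--     def is_prime(p):
--         if p % 2 == 0:
--             return p == 2
--         d = 3
--         while d * d <= p:
--             if p % d == 0:
--                 return False
--             d += 2
--         return True
--     result = 1
--     for p in range(2, N + 1):
--         if is_prime(p):
--             s, m = 0, N
--             while m:
--                 s += m % p
--                 m //= p
--             result = result * (2 * ((N - s) // (p - 1)) + 1) % MOD
--     return result
-- ===== Notes on version B (the rewrite author's own statement) =====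
-- stated objective: alternative
-- what changed: B drops A's sieve array and primes list entirely: it tests each candidate by odd-step trial division up to its square root and computes each prime's exponent in N! by Legendre's closed-form digit-sum identity (N - digitsum_base_p(N))//(p-1) instead of A's repeated-division summation loop.
import Mathlib
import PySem

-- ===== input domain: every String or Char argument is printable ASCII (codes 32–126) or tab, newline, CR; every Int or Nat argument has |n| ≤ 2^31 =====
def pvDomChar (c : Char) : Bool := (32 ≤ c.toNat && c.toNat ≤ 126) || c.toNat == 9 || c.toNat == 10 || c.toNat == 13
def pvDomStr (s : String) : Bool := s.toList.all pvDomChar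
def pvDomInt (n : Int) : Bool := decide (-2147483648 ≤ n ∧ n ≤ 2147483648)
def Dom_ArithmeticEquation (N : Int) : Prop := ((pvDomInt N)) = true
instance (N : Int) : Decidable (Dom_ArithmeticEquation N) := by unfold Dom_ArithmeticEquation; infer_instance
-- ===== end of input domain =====

-- B drops A's sieve array and primes list: it tests each candidate by trial division up to
-- its square root and computes each prime's exponent in N! by Legendre's digit-sum identity
-- (N - digitsum_p(N)) // (p-1) instead of A's repeated-division loop (alternative algorithm).

-- ===== PORT A =====
-- 'while pk <= N: exp += N // pk; pk *= p' as fueled tail recursion; fuel N.toNat+1 is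
-- enough: pk = p^k ≥ 2^k, so the loop runs at most log2 N + 1 ≤ N.toNat + 1 times.
def pvExpLoopA (fuel : Nat) (N p exp pk : Int) : Int :=
  match fuel with
  | 0 => exp
  | f + 1 =>
    if pk ≤ N then pvExpLoopA f N p (exp + PySem.Int.floordiv N pk) (pk * p) else exp

-- one iteration of A's sieve loop over state (sieve, primes). The Python list 'sieve'
-- is a mutable array, so it is ported as Array Bool; the indices i and j are always
-- 0 ≤ i, j ≤ N < sieve.size here, so .toNat / getD / setIfInBounds are exact.
def pvSieveStepA (N : Int) (st : Array Bool × List Int) (i : Int) : Array Bool × List Int :=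
  if st.1.getD i.toNat false then
    ((PySem.List.pyRange (i * i) (N + 1) i).foldl
        (fun sv j => sv.setIfInBounds j.toNat false) st.1,
     st.2 ++ [i])
  else st

def ArithmeticEquation (N : Int) : Int :=
  (((PySem.List.pyRange 2 (N + 1) 1).foldl (pvSieveStepA N)
      (Array.replicate (N + 1).toNat true, ([] : List Int))).2).foldl
    (fun result p =>
      PySem.Int.mod (result * (2 * pvExpLoopA (N.toNat + 1) N p 0 p + 1)) 1000007) 1

-- ===== PORT B =====
-- 'd = 3; while d*d <= p: if p % d == 0: return False; d += 2; return True' as fueled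
-- tail recursion; fuel p.toNat+1 suffices: d only grows and the guard fails once d > p.
def pvTrialLoopB (fuel : Nat) (p d : Int) : Bool :=
  match fuel with
  | 0 => true
  | f + 1 =>
    if d * d ≤ p then
      (if PySem.Int.mod p d == 0 then false else pvTrialLoopB f p (d + 2))
    else true

def pvIsPrimeB (p : Int) : Bool :=
  if PySem.Int.mod p 2 == 0 then p == 2 else pvTrialLoopB (p.toNat + 1) p 3

-- 'while m: s += m % p; m //= p' as fueled tail recursion; fuel N.toNat+1 is enough:
-- m starts at N and at least halves each iteration (p ≥ 2 whenever the loop is reached).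
def pvDigitLoopB (fuel : Nat) (p s m : Int) : Int :=
  match fuel with
  | 0 => s
  | f + 1 =>
    if m ≠ 0 then pvDigitLoopB f p (s + PySem.Int.mod m p) (PySem.Int.floordiv m p) else s

def ArithmeticEquation_alt (N : Int) : Int :=
  (PySem.List.pyRange 2 (N + 1) 1).foldl
    (fun result p =>
      if pvIsPrimeB p then
        PySem.Int.mod
          (result *
            (2 * PySem.Int.floordiv (N - pvDigitLoopB (N.toNat + 1) p 0 N) (p - 1) + 1))
          1000007
      else result) 1

-- ===== PRECONDITION & SPEC =====
def Spec_ArithmeticEquation (N : Int) (out : Int) : Prop := out = ArithmeticEquation_alt N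
instance (N : Int) (out : Int) : Decidable (Spec_ArithmeticEquation N out) := by unfold Spec_ArithmeticEquation; infer_instance

-- ===== CLAIM (what is proved, stated in full; the proofs are below) =====
def Claim_equal_ArithmeticEquation : Prop := ∀ (N : Int), Dom_ArithmeticEquation N → Spec_ArithmeticEquation N (ArithmeticEquation N)

-- ===== LEMMAS AND PROOFS =====

-- mathematical Legendre exponent: pvR p n = Σ_{k ≥ 1} n / p^k
def pvR (p n : Int) : Int :=
  if h : 2 ≤ p ∧ 0 < n then n / p + pvR p (n / p) else 0
termination_by n.toNat
decreasing_by
  have h1 : n / p < n := by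
    apply Int.ediv_lt_of_lt_mul (by omega)
    nlinarith [h.1, h.2]
  have h2 : 0 ≤ n / p := Int.ediv_nonneg (by omega) (by omega)
  omega

-- digit sum of n in base p
def pvS (p n : Int) : Int :=
  if h : 2 ≤ p ∧ 0 < n then n % p + pvS p (n / p) else 0
termination_by n.toNat
decreasing_by
  have h1 : n / p < n := by
    apply Int.ediv_lt_of_lt_mul (by omega)
    nlinarith [h.1, h.2]
  have h2 : 0 ≤ n / p := Int.ediv_nonneg (by omega) (by omega)
  omega

theorem pvExpLoopA_acc (f : Nat) (N p e pk : Int) :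
    pvExpLoopA f N p e pk = e + pvExpLoopA f N p 0 pk := by
  induction f generalizing e pk with
  | zero => simp [pvExpLoopA]
  | succ f ih =>
    simp only [pvExpLoopA]
    split
    · rw [ih, ih (0 + _)]; ring
    · simp

theorem pvExpLoopA_shift (f : Nat) (N p pk : Int) (hp : 2 ≤ p) (hpk : 1 ≤ pk)
    (hN : 0 ≤ N) :
    pvExpLoopA f N p 0 (p * pk) = pvExpLoopA f (N / p) p 0 pk := by
  induction f generalizing pk with
  | zero => rfl
  | succ f ih =>
    have hcond : p * pk ≤ N ↔ pk ≤ N / p := by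
      rw [Int.le_ediv_iff_mul_le (by omega)]
      constructor <;> intro h <;> nlinarith
    have hval : N / (p * pk) = N / p / pk := (Int.ediv_ediv_of_nonneg (by omega)).symm
    simp only [pvExpLoopA]
    by_cases h : p * pk ≤ N
    · rw [if_pos h, if_pos (hcond.mp h)]
      rw [pvExpLoopA_acc, pvExpLoopA_acc f (N / p)]
      have hppk : (0:Int) < p * pk := by nlinarith
      rw [PySem.Int.floordiv_eq_ediv_of_pos hppk,
          PySem.Int.floordiv_eq_ediv_of_pos (by omega : (0:Int) < pk)]
      have : p * pk * p = p * (pk * p) := by ring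
      rw [this, ih (pk * p) (by nlinarith), hval]
    · rw [if_neg h, if_neg (fun hc => h (hcond.mpr hc))]

-- pvR unfolding in the shape of A's loop guard
theorem pvR_eq (p n : Int) (hp : 2 ≤ p) (hn : 0 ≤ n) :
    pvR p n = if p ≤ n then n / p + pvR p (n / p) else 0 := by
  rw [pvR]
  by_cases h : p ≤ n
  · rw [dif_pos ⟨hp, by omega⟩, if_pos h]
  · rw [if_neg h]
    by_cases h0 : 0 < n
    · rw [dif_pos ⟨hp, h0⟩]
      have hz : n / p = 0 := Int.ediv_eq_zero_of_lt hn (by omega)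
      rw [hz, pvR]
      simp
    · rw [dif_neg (by omega)]

theorem pvExpLoopA_spec (f : Nat) (N p : Int) (hp : 2 ≤ p) (hN : 0 ≤ N)
    (hf : N.toNat ≤ f) :
    pvExpLoopA f N p 0 p = pvR p N := by
  induction f generalizing N with
  | zero =>
    have : N = 0 := by omega
    subst this
    rw [pvR_eq p 0 hp le_rfl, if_neg (by omega)]; rfl
  | succ f ih =>
    rw [pvR_eq p N hp hN]
    simp only [pvExpLoopA]
    by_cases h : p ≤ N
    · rw [if_pos h, if_pos h, pvExpLoopA_acc]
      have hstep : pvExpLoopA f N p 0 (p * p) = pvExpLoopA f (N / p) p 0 p :=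
        pvExpLoopA_shift f N p p hp (by omega) hN
      have hlt : N / p < N := by
        apply Int.ediv_lt_of_lt_mul (by omega)
        nlinarith
      have hnn : 0 ≤ N / p := Int.ediv_nonneg hN (by omega)
      rw [PySem.Int.floordiv_eq_ediv_of_pos (by omega : (0:Int) < p)]
      rw [hstep, ih (N / p) hnn (by omega)]
      omega
    · rw [if_neg h, if_neg h]

theorem pvDigitLoopB_acc (f : Nat) (p s m : Int) :
    pvDigitLoopB f p s m = s + pvDigitLoopB f p 0 m := by
  induction f generalizing s m with
  | zero => simp [pvDigitLoopB]
  | succ f ih =>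
    simp only [pvDigitLoopB]
    split
    · rw [ih, ih (0 + _)]; ring
    · simp

theorem pvDigitLoopB_spec (f : Nat) (p n : Int) (hp : 2 ≤ p) (hn : 0 ≤ n)
    (hf : n.toNat ≤ f) :
    pvDigitLoopB f p 0 n = pvS p n := by
  induction f generalizing n with
  | zero =>
    have : n = 0 := by omega
    subst this
    rw [pvS, dif_neg (by omega)]; rfl
  | succ f ih =>
    simp only [pvDigitLoopB]
    by_cases h : n ≠ 0
    · have h0 : 0 < n := by omega
      rw [pvS, dif_pos ⟨hp, h0⟩, if_pos h, pvDigitLoopB_acc]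
      have hlt : n / p < n := by
        apply Int.ediv_lt_of_lt_mul (by omega)
        nlinarith
      have hnn : 0 ≤ n / p := Int.ediv_nonneg hn (by omega)
      rw [PySem.Int.floordiv_eq_ediv_of_pos (by omega : (0:Int) < p),
          PySem.Int.mod_eq_emod_of_pos (by omega : (0:Int) < p)]
      rw [ih (n / p) hnn (by omega)]
      omega
    · rw [if_neg h, pvS, dif_neg (by omega)]

theorem pvS_nonneg (p n : Int) : 0 ≤ pvS p n := by
  rw [pvS]
  split
  · rename_i h
    have := pvS_nonneg p (n / p)
    have := Int.emod_nonneg n (by omega : p ≠ 0)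
    omega
  · omega
termination_by n.toNat
decreasing_by
  rename_i h
  have h1 : n / p < n := by
    apply Int.ediv_lt_of_lt_mul (by omega)
    nlinarith [h.1, h.2]
  have h2 : 0 ≤ n / p := Int.ediv_nonneg (by omega) (by omega)
  omega

theorem pvS_dvd (p n : Int) (hp : 2 ≤ p) (hn : 0 ≤ n) : (p - 1) ∣ (n - pvS p n) := by
  by_cases h0 : 0 < n
  · rw [pvS, dif_pos ⟨hp, h0⟩]
    have hnn : 0 ≤ n / p := Int.ediv_nonneg hn (by omega)
    have hlt : n / p < n := by
      apply Int.ediv_lt_of_lt_mul (by omega)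
      nlinarith
    have ih := pvS_dvd p (n / p) hp hnn
    have hsplit : n - (n % p + pvS p (n / p))
        = (p - 1) * (n / p) + (n / p - pvS p (n / p)) := by
      have := Int.mul_ediv_add_emod n p
      linarith
    rw [hsplit]
    exact dvd_add (Dvd.intro _ rfl) ih
  · have : n = 0 := by omega
    subst this
    rw [pvS, dif_neg (by omega)]
    simp
termination_by n.toNat
decreasing_by
  have h1 : n / p < n := by
    apply Int.ediv_lt_of_lt_mul (by omega)
    nlinarith
  have h2 : 0 ≤ n / p := Int.ediv_nonneg (by omega) (by omega)
  omega

-- Legendre's identity: Σ n/p^k = (n - digitsum_p n) / (p - 1)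
theorem pvR_eq_digit (p n : Int) (hp : 2 ≤ p) (hn : 0 ≤ n) :
    pvR p n = (n - pvS p n) / (p - 1) := by
  by_cases h0 : 0 < n
  · have hnn : 0 ≤ n / p := Int.ediv_nonneg hn (by omega)
    have hlt : n / p < n := by
      apply Int.ediv_lt_of_lt_mul (by omega)
      nlinarith
    have ih := pvR_eq_digit p (n / p) hp hnn
    obtain ⟨c, hc⟩ := pvS_dvd p (n / p) hp hnn
    rw [pvR, dif_pos ⟨hp, h0⟩, pvS, dif_pos ⟨hp, h0⟩]
    have hsplit : n - (n % p + pvS p (n / p)) = (p - 1) * (n / p + c) := by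
      have := Int.mul_ediv_add_emod n p
      linarith
    rw [hsplit, Int.mul_ediv_cancel_left _ (by omega : p - 1 ≠ 0)]
    rw [ih, hc, Int.mul_ediv_cancel_left _ (by omega : p - 1 ≠ 0)]
  · have : n = 0 := by omega
    subst this
    rw [pvR, dif_neg (by omega), pvS, dif_neg (by omega)]
    simp
termination_by n.toNat
decreasing_by
  have h1 : n / p < n := by
    apply Int.ediv_lt_of_lt_mul (by omega)
    nlinarith
  have h2 : 0 ≤ n / p := Int.ediv_nonneg (by omega) (by omega)
  omega

-- per-prime agreement of the two exponent computations
theorem pvExp_agree (N i : Int) (hi : 2 ≤ i) (hN : 0 ≤ N) :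
    pvExpLoopA (N.toNat + 1) N i 0 i
      = PySem.Int.floordiv (N - pvDigitLoopB (N.toNat + 1) i 0 N) (i - 1) := by
  rw [PySem.Int.floordiv_eq_ediv_of_pos (by omega : (0:Int) < i - 1)]
  rw [pvExpLoopA_spec _ N i hi hN (by omega),
      pvDigitLoopB_spec _ i N hi hN (by omega)]
  exact pvR_eq_digit i N hi hN

-- B's trial-division loop decides the absence of a divisor e ≡ d (mod 2), d ≤ e, e*e ≤ p
theorem pvTrialLoopB_spec (f : Nat) (p d : Int) (hd : 1 ≤ d)
    (hf : (p + 1 - d).toNat ≤ f) :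
    pvTrialLoopB f p d = true ↔ ¬ ∃ e, d ≤ e ∧ e * e ≤ p ∧ e ∣ p ∧ 2 ∣ (e - d) := by
  induction f generalizing d with
  | zero =>
    have hdp : p < d := by omega
    simp only [pvTrialLoopB, true_iff]
    rintro ⟨e, he1, he2, -⟩
    nlinarith
  | succ f ih =>
    simp only [pvTrialLoopB]
    by_cases hg : d * d ≤ p
    · rw [if_pos hg]
      have hp0 : 0 < p := by nlinarith
      have hmod : PySem.Int.mod p d = p % d :=
        PySem.Int.mod_eq_emod_of_pos (by omega : (0:Int) < d)
      by_cases hdvd : d ∣ p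
      · have hz : p % d = 0 := Int.emod_eq_zero_of_dvd hdvd
        rw [hmod, hz]
        simp only [beq_self_eq_true, if_true]
        constructor
        · intro h; exact absurd h (by simp)
        · intro h; exact absurd (⟨d, le_refl d, hg, hdvd, by omega⟩ :
            ∃ e, d ≤ e ∧ e * e ≤ p ∧ e ∣ p ∧ 2 ∣ (e - d)) h
      · have : p % d ≠ 0 := fun h => hdvd (Int.dvd_of_emod_eq_zero h)
        rw [hmod, if_neg (by simpa using this)]
        rw [ih (d + 2) (by omega) (by omega)]
        constructor
        · rintro h ⟨e, he1, he2, he3, he4⟩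
          rcases eq_or_lt_of_le he1 with rfl | hlt
          · exact hdvd he3
          · have he1' : d + 2 ≤ e := by omega
            exact h ⟨e, he1', he2, he3, by omega⟩
        · rintro h ⟨e, he1, he2, he3, he4⟩
          exact h ⟨e, by omega, he2, he3, by omega⟩
    · rw [if_neg hg]
      simp only [true_iff]
      rintro ⟨e, he1, he2, -⟩
      have : d * d ≤ e * e := by nlinarith
      omega

def pvHasSmallDiv (p : Int) : Prop := ∃ e, 2 ≤ e ∧ e * e ≤ p ∧ e ∣ p

theorem pvIsPrimeB_spec (p : Int) (hp : 2 ≤ p) :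
    pvIsPrimeB p = true ↔ ¬ pvHasSmallDiv p := by
  unfold pvIsPrimeB pvHasSmallDiv
  have hmod2 : PySem.Int.mod p 2 = p % 2 :=
    PySem.Int.mod_eq_emod_of_pos (by omega : (0:Int) < 2)
  by_cases hev : p % 2 = 0
  · rw [hmod2, hev]
    simp only [beq_self_eq_true, if_true]
    have h2p : (2 : Int) ∣ p := Int.dvd_of_emod_eq_zero hev
    by_cases h2 : p = 2
    · subst h2
      simp only [beq_self_eq_true, true_iff]
      rintro ⟨e, he1, he2, -⟩
      nlinarith
    · have hp4 : 4 ≤ p := by omega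
      have hsd : ∃ e, 2 ≤ e ∧ e * e ≤ p ∧ e ∣ p := ⟨2, le_refl 2, by omega, h2p⟩
      constructor
      · intro h
        exact absurd (by simpa using h) h2
      · intro h
        exact absurd hsd h
  · rw [hmod2, if_neg (by simpa using hev)]
    rw [pvTrialLoopB_spec _ p 3 (by omega) (by omega)]
    constructor
    · rintro h ⟨e, he1, he2, he3⟩
      have heodd : ¬ (2 : Int) ∣ e := by
        intro h2e
        exact hev (Int.emod_eq_zero_of_dvd (h2e.trans he3))
      have he3' : 3 ≤ e := by omega
      exact h ⟨e, he3', he2, he3, by omega⟩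
    · rintro h ⟨e, he1, he2, he3, -⟩
      exact h ⟨e, by omega, he2, he3⟩

-- sieve evolution and the primes it emits, as separate recursions
def pvSieves (N : Int) : List Int → Array Bool → Array Bool
  | [], sv => sv
  | i :: t, sv =>
    if sv.getD i.toNat false then
      pvSieves N t ((PySem.List.pyRange (i * i) (N + 1) i).foldl
        (fun sv j => sv.setIfInBounds j.toNat false) sv)
    else pvSieves N t sv

def pvPrimes (N : Int) : List Int → Array Bool → List Int
  | [], _ => []
  | i :: t, sv =>
    if sv.getD i.toNat false then
      i :: pvPrimes N t ((PySem.List.pyRange (i * i) (N + 1) i).foldl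
        (fun sv j => sv.setIfInBounds j.toNat false) sv)
    else pvPrimes N t sv

theorem foldA_split (N : Int) (l : List Int) :
    ∀ (sv : Array Bool) (ps : List Int),
      l.foldl (pvSieveStepA N) (sv, ps) = (pvSieves N l sv, ps ++ pvPrimes N l sv) := by
  induction l with
  | nil => intro sv ps; simp [pvSieves, pvPrimes]
  | cons i t ih =>
    intro sv ps
    simp only [List.foldl_cons, pvSieveStepA, pvSieves, pvPrimes]
    by_cases h : sv.getD i.toNat false
    · rw [if_pos h, if_pos h, if_pos h, ih]
      simp
    · rw [if_neg h, if_neg h, if_neg h, ih]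

-- marking a list of nonnegative indices false: size and pointwise effect
theorem pvMark_size (L : List Int) (sv : Array Bool) :
    (L.foldl (fun a j => a.setIfInBounds j.toNat false) sv).size = sv.size := by
  induction L generalizing sv with
  | nil => rfl
  | cons j t ih => simp [List.foldl_cons, ih, Array.size_setIfInBounds]

theorem pvMark_getD (L : List Int) (sv : Array Bool) (k : Nat)
    (hL : ∀ j ∈ L, 0 ≤ j) :
    (L.foldl (fun a j => a.setIfInBounds j.toNat false) sv).getD k false
      = (sv.getD k false && !decide ((k : Int) ∈ L)) := by
  induction L generalizing sv with
  | nil => simp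
  | cons j t ih =>
    have hj : 0 ≤ j := hL j (List.mem_cons_self ..)
    have ht : ∀ x ∈ t, 0 ≤ x := fun x hx => hL x (List.mem_cons_of_mem _ hx)
    simp only [List.foldl_cons]
    rw [ih _ ht]
    have hstep : (sv.setIfInBounds j.toNat false).getD k false
        = (sv.getD k false && !decide ((k : Int) = j)) := by
      rw [Array.getD_eq_getD_getElem?, Array.getD_eq_getD_getElem?,
          Array.getElem?_setIfInBounds]
      by_cases hjk : j.toNat = k
      · have : (k : Int) = j := by omega
        rw [if_pos hjk]
        simp only [this, decide_true, Bool.not_true, Bool.and_false]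
        split <;> simp
      · have : (k : Int) ≠ j := by omega
        rw [if_neg hjk]
        simp [this]
    rw [hstep]
    by_cases h1 : (k : Int) = j <;> by_cases h2 : (k : Int) ∈ t <;>
      simp [h1, h2]

-- invariant of the sieve after processing candidates 2..b-1:
-- an entry j ≤ N is false exactly when some d < b with d*d ≤ j divides it
def pvInv (N b : Int) (sv : Array Bool) : Prop :=
  sv.size = (N + 1).toNat ∧
  ∀ j : Int, 0 ≤ j → j ≤ N →
    (sv.getD j.toNat false = false ↔ ∃ d, 2 ≤ d ∧ d < b ∧ d ∣ j ∧ d * d ≤ j)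

theorem pvInv_init (N : Int) (hN : 0 ≤ N) :
    pvInv N 2 (Array.replicate (N + 1).toNat true) := by
  refine ⟨Array.size_replicate, fun j hj0 hjN => ?_⟩
  have hk : j.toNat < (N + 1).toNat := by omega
  rw [Array.getD_eq_getD_getElem?]
  rw [Array.getElem?_eq_getElem (by simpa using hk)]
  simp only [Array.getElem_replicate, Option.getD_some]
  constructor
  · intro h; exact absurd h (by simp)
  · rintro ⟨d, h1, h2, -, -⟩; omega

theorem pvInv_step_true (N b : Int) (hb : 2 ≤ b) (hbN : b ≤ N) (sv : Array Bool)
    (hinv : pvInv N b sv) :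
    pvInv N (b + 1) ((PySem.List.pyRange (b * b) (N + 1) b).foldl
      (fun a j => a.setIfInBounds j.toNat false) sv) := by
  obtain ⟨hsz, hpt⟩ := hinv
  have hLnn : ∀ j ∈ PySem.List.pyRange (b * b) (N + 1) b, 0 ≤ j := by
    intro j hj
    have := (PySem.List.mem_pyRange_iff_of_pos (by omega : (0:Int) < b) j).mp hj
    nlinarith [this.1]
  refine ⟨by rw [pvMark_size]; exact hsz, fun j hj0 hjN => ?_⟩
  rw [pvMark_getD _ _ _ hLnn]
  have hjc : ((j.toNat : Int)) = j := by omega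
  have hmem : ((j.toNat : Int) ∈ PySem.List.pyRange (b * b) (N + 1) b)
      ↔ (b ∣ j ∧ b * b ≤ j) := by
    rw [hjc, PySem.List.mem_pyRange_iff_of_pos (by omega : (0:Int) < b)]
    have hbb : b ∣ b * b := Dvd.intro b rfl
    constructor
    · rintro ⟨h1, h2, h3⟩
      refine ⟨?_, h1⟩
      have := dvd_add h3 hbb
      simpa using this
    · rintro ⟨h1, h2⟩
      exact ⟨h2, by omega, dvd_sub h1 hbb⟩
  constructor
  · intro h
    rcases Bool.and_eq_false_iff.mp h with h | h
    · obtain ⟨d, h1, h2, h3, h4⟩ := (hpt j hj0 hjN).mp h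
      exact ⟨d, h1, by omega, h3, h4⟩
    · have : (j.toNat : Int) ∈ PySem.List.pyRange (b * b) (N + 1) b := by
        simpa using h
      obtain ⟨hdvd, hsq⟩ := hmem.mp this
      exact ⟨b, by omega, by omega, hdvd, hsq⟩
  · rintro ⟨d, h1, h2, h3, h4⟩
    by_cases hdb : d < b
    · have hfalse : sv.getD j.toNat false = false := (hpt j hj0 hjN).mpr ⟨d, h1, hdb, h3, h4⟩
      rw [hfalse]
      simp
    · have hdb' : d = b := by omega
      have hmm : (j.toNat : Int) ∈ PySem.List.pyRange (b * b) (N + 1) b :=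
        hmem.mpr ⟨hdb' ▸ h3, hdb' ▸ h4⟩
      rw [decide_eq_true hmm]
      simp

theorem pvInv_step_false (N b : Int) (hb : 2 ≤ b) (hbN : b ≤ N) (sv : Array Bool)
    (hinv : pvInv N b sv) (hsv : sv.getD b.toNat false = false) :
    pvInv N (b + 1) sv := by
  obtain ⟨hsz, hpt⟩ := hinv
  obtain ⟨q, hq1, hq2, hq3, hq4⟩ := (hpt b (by omega) hbN).mp hsv
  refine ⟨hsz, fun j hj0 hjN => ?_⟩
  rw [hpt j hj0 hjN]
  constructor
  · rintro ⟨d, h1, h2, h3, h4⟩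
    exact ⟨d, h1, by omega, h3, h4⟩
  · rintro ⟨d, h1, h2, h3, h4⟩
    by_cases hdb : d < b
    · exact ⟨d, h1, hdb, h3, h4⟩
    · have hdb' : d = b := by omega
      subst hdb'
      refine ⟨q, hq1, hq2, hq3.trans h3, ?_⟩
      nlinarith

-- when candidate b is reached, its sieve entry equals B's trial-division verdict
theorem pvInv_char (N b : Int) (hb : 2 ≤ b) (hbN : b ≤ N) (sv : Array Bool)
    (hinv : pvInv N b sv) :
    sv.getD b.toNat false = pvIsPrimeB b := by
  obtain ⟨-, hpt⟩ := hinv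
  have hiff : sv.getD b.toNat false = false ↔ pvHasSmallDiv b := by
    rw [hpt b (by omega) hbN]
    constructor
    · rintro ⟨d, h1, h2, h3, h4⟩
      exact ⟨d, h1, h4, h3⟩
    · rintro ⟨e, h1, h2, h3⟩
      have : e < b := by nlinarith
      exact ⟨e, h1, this, h3, h2⟩
  have hprime := pvIsPrimeB_spec b hb
  cases hv : sv.getD b.toNat false
  · have := hiff.mp hv
    cases hp : pvIsPrimeB b
    · rfl
    · exact absurd this (hprime.mp hp)
  · cases hp : pvIsPrimeB b
    · have : pvHasSmallDiv b := by
        by_contra hno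
        rw [← hprime] at hno
        simp [hp] at hno
      rw [hiff.mpr this] at hv
      exact absurd hv (by simp)
    · rfl

-- the primes A's sieve emits are exactly the candidates B's trial division accepts
theorem pvPrimes_filter (N : Int) (hN : 0 ≤ N) :
    ∀ (k : Nat) (b : Int), 2 ≤ b → (N + 1 - b).toNat = k →
      ∀ sv, pvInv N b sv →
        pvPrimes N (PySem.List.pyRange b (N + 1) 1) sv
          = (PySem.List.pyRange b (N + 1) 1).filter (fun i => pvIsPrimeB i) := by
  intro k
  induction k with
  | zero =>
    intro b hb hk sv hinv
    rw [PySem.List.pyRange_one_eq_nil (by omega)]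
    rfl
  | succ k ih =>
    intro b hb hk sv hinv
    have hbN : b ≤ N := by omega
    rw [PySem.List.pyRange_one_cons (by omega : b < N + 1)]
    rw [List.filter_cons]
    simp only [pvPrimes]
    rw [pvInv_char N b hb hbN sv hinv]
    by_cases hp : pvIsPrimeB b = true
    · rw [if_pos hp, if_pos hp]
      rw [ih (b + 1) (by omega) (by omega) _
        (pvInv_step_true N b hb hbN sv hinv)]
    · rw [if_neg hp, if_neg hp]
      refine ih (b + 1) (by omega) (by omega) sv ?_
      refine pvInv_step_false N b hb hbN sv hinv ?_
      rw [pvInv_char N b hb hbN sv hinv]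
      simpa using hp

-- ===== VERDICT (by name: the statement is the Claim_ definition above) =====
theorem ArithmeticEquation_spec : Claim_equal_ArithmeticEquation := by
  intro N _hDom
  unfold Spec_ArithmeticEquation ArithmeticEquation ArithmeticEquation_alt
  by_cases hN : N + 1 ≤ 2
  · rw [PySem.List.pyRange_one_eq_nil hN]
    rfl
  · have hN0 : 0 ≤ N := by omega
    rw [foldA_split]
    rw [pvPrimes_filter N hN0 (N + 1 - 2).toNat 2 (by omega) rfl _
      (pvInv_init N hN0)]
    simp only [List.nil_append]
    rw [List.foldl_filter]
    apply PySem.List.foldl_congr_mem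
    intro acc x hx
    have hx2 : 2 ≤ x := ((PySem.List.mem_pyRange_one).mp hx).1
    by_cases hp : pvIsPrimeB x = true
    · simp only [if_pos hp]
      rw [pvExp_agree N x hx2 hN0]
    · simp only [if_neg hp]
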